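-- pv_equiv track=rewrite | github.com/LennartElbe/codeEvo | StudentProblem/10.21.12.9/1/1569575225.py | word_count_iter
-- ===== SOURCE A (Python) =====
-- def nwords(s: str) -> int:
--     """Returns the number of words in s.
--     Arguments:
--         s: A string
--     """
--     res = 0
--     for letter in s:
--         if letter == ' ':
--             res += 1
--     if s != "":
--         res += 1
--     return res
--
-- def word_count_iter(x) -> tuple:
--     """Returns a tuple with the frequency of the lines, the words and the letters.
--     Arguments:
--         x: A iterable argument
--     """
--     lines = 0
--     words = 0
--     letters = 0
--     for line in x:
--         lines += 1
--         words += nwords(line)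
--         for letter in line:
--             if letter != ' ':
--                 letters += 1
--     return (lines, words, letters)
-- ===== SOURCE B (Python) =====
-- def word_count_iter(x) -> tuple:
--     """Returns a tuple with the frequency of the lines, the words and the letters.
--     Arguments:
--         x: A iterable argument
--     """
--     lst = list(x)
--     chars = [c for line in lst for c in line]
--     spaces = chars.count(' ')
--     lines = len(lst)
--     words = spaces + sum(1 for line in lst if line)
--     letters = len(chars) - spaces
--     return (lines, words, letters)
-- ===== Notes on version B (the rewrite author's own statement) =====
-- stated objective: simpler
-- what changed: B materializes the iterable, flattens all lines into one character list and counts spaces once globally, deriving words and letters arithmetically, instead of A's single interleaved pass with a per-line nwords helper and nested character loops.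
import Mathlib
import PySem

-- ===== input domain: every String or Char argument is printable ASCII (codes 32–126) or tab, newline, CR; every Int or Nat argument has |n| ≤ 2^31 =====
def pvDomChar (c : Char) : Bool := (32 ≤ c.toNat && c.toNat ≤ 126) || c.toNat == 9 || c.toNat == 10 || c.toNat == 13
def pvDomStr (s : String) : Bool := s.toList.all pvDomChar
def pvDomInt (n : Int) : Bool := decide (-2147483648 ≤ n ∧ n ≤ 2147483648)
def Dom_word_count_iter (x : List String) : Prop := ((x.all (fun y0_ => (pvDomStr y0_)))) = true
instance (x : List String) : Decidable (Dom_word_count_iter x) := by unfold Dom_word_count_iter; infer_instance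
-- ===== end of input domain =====

-- B flattens the lines once and counts spaces globally instead of A's interleaved per-line loops; objective: simpler.

-- ===== PORT A =====
def nwords (s : String) : Int :=
  let res : Int := s.toList.foldl (fun res letter => if letter == ' ' then res + 1 else res) 0
  if s ≠ "" then res + 1 else res

def word_count_iter (x : List String) : Int × Int × Int :=
  x.foldl (fun (acc : Int × Int × Int) line =>
      let lines := acc.1 + 1
      let words := acc.2.1 + nwords line
      let letters := line.toList.foldl
        (fun letters letter => if letter != ' ' then letters + 1 else letters) acc.2.2
      (lines, words, letters)) (0, 0, 0)

-- ===== PORT B =====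
def word_count_iter_alt (x : List String) : Int × Int × Int :=
  let lst := x
  let chars := lst.flatMap (fun line => line.toList)
  let spaces : Int := chars.count ' '
  let lines : Int := lst.length
  let words : Int := spaces + ((lst.filter (fun line => line ≠ "")).length : Int)
  let letters : Int := (chars.length : Int) - spaces
  (lines, words, letters)

-- ===== PRECONDITION & SPEC =====
def Spec_word_count_iter (x : List String) (out : Int × Int × Int) : Prop := out = word_count_iter_alt x
instance (x : List String) (out : Int × Int × Int) : Decidable (Spec_word_count_iter x out) := by unfold Spec_word_count_iter; infer_instance

-- ===== CLAIM (what is proved, stated in full; the proofs are below) =====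
def Claim_equal_word_count_iter : Prop := ∀ (x : List String), Dom_word_count_iter x → Spec_word_count_iter x (word_count_iter x)

-- ===== LEMMAS AND PROOFS =====

lemma nwords_eq (s : String) :
    nwords s = (s.toList.count ' ' : Int) + (if s ≠ "" then 1 else 0) := by
  unfold nwords
  rw [PySem.List.foldl_beq_add_one]
  split_ifs <;> simp

lemma inner_fold_eq (l : List Char) (c : Int) :
    l.foldl (fun letters letter => if letter != ' ' then letters + 1 else letters) c
      = c + ((l.length : Int) - (l.count ' ' : Int)) := by
  rw [PySem.List.foldl_if_add_one]
  have h1 := List.length_eq_countP_add_countP (p := fun letter => letter != ' ') (l := l)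
  have h2 : l.countP (fun a => decide ¬((a != ' ') = true)) = l.count ' ' := by
    rw [List.count]
    apply List.countP_congr
    intro a _
    cases h : a == ' ' <;> simp_all
  omega

lemma fold_shift (lst : List String) (a b c : Int) :
    lst.foldl (fun (acc : Int × Int × Int) line =>
      let lines := acc.1 + 1
      let words := acc.2.1 + nwords line
      let letters := line.toList.foldl
        (fun letters letter => if letter != ' ' then letters + 1 else letters) acc.2.2
      (lines, words, letters)) (a, b, c)
    = (a + (lst.length : Int),
       b + ((lst.flatMap (fun line => line.toList)).count ' ' : Int)
         + ((lst.filter (fun line => line ≠ "")).length : Int),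
       c + ((lst.flatMap (fun line => line.toList)).length : Int)
         - ((lst.flatMap (fun line => line.toList)).count ' ' : Int)) := by
  induction lst generalizing a b c with
  | nil => simp
  | cons s t ih =>
    rw [List.foldl_cons]
    show (t.foldl _ (a + 1, b + nwords s, s.toList.foldl _ c)) = _
    rw [ih, nwords_eq, inner_fold_eq]
    simp only [List.flatMap_cons, List.count_append, List.length_append, List.filter_cons,
      Prod.mk.injEq]
    refine ⟨by push_cast [List.length_cons]; ring, ?_, by push_cast; ring⟩
    by_cases hs : s = "" <;> simp [hs] <;> ring

-- ===== VERDICT (by name: the statement is the Claim_ definition above) =====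
theorem word_count_iter_spec : Claim_equal_word_count_iter := by
  intro x _
  unfold Spec_word_count_iter word_count_iter word_count_iter_alt
  rw [fold_shift]
  simp only [Prod.mk.injEq]
  omega
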